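-- pv_equiv track=rewrite | github.com/superdesk/superdesk-ewtn | server/ewt/macros/headline_capitalizer.py | capitalize_headline
-- ===== SOURCE A (Python) =====
-- import itertools
--
-- do_not_capitalize = "a an the and but for at by in to of".split()
--
-- def capitalize_headline(headline):
--     words = []
--     splitters = []
--     word = ""
--     for char in headline:
--         if char in [' ', '-']:
--             splitters.append(char)
--             words.append(word)
--             word = ""
--         else:
--             word = word + char
--     words.append(word)
--
--     capitalized = []
--     for word in words:
--         if ''.join(filter(str.isalpha, word)) in do_not_capitalize:  # filtering non-alphabet chars from the word
--             capitalized.append(word)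
--         else:
--             capitalized.append(uppercase_first_letter(word))
--
--     zip_result = itertools.zip_longest(capitalized, splitters, fillvalue="")
--     ordered_bits = [item for sublist in zip_result for item in sublist]
--     return "".join(ordered_bits)
--
-- def uppercase_first_letter(word):
--     for i in range(len(word)):
--         '''
--             The input "word" may contain opening quotation marks, so ignore those / skip past them to find the first
--             non-quotation-mark character to capitalize.
--
--             \u2018 = left single quote
--             \u201C = left double quote
--         '''
--         if word[i] not in ['"', "'", "\u2018", "\u201C"]:
--             return word[0:i] + word[i].capitalize() + word[i + 1:]
--     return word
-- ===== SOURCE B (Python) =====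
-- do_not_capitalize = frozenset("a an the and but for at by in to of".split())
--
-- def uppercase_first_letter(word):
--     i = 0
--     while i < len(word) and word[i] in '"\'\u2018\u201C':
--         i += 1
--     if i == len(word):
--         return word
--     return word[:i] + word[i].upper() + word[i + 1:]
--
-- def _fix_word(word):
--     if ''.join(c for c in word if c.isalpha()) in do_not_capitalize:
--         return word
--     return uppercase_first_letter(word)
--
-- def capitalize_headline(headline):
--     out = []
--     i, n = 0, len(headline)
--     while True:
--         j = i
--         while j < n and headline[j] not in ' -':
--             j += 1
--         out.append(_fix_word(headline[i:j]))
--         if j == n: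
--             return ''.join(out)
--         out.append(headline[j])
--         i = j + 1
-- ===== Notes on version B (the rewrite author's own statement) =====
-- stated objective: simpler
-- what changed: Replaces A's three passes (char-by-char scan into parallel words/splitters lists, a map, then zip_longest reassembly) with a single left-to-right tokenizing loop that scans each word with an index, fixes it, and appends the delimiter immediately; the quote-skipping helper becomes a skip-the-quote-run computation instead of an indexed slice-rebuilding loop.
import Mathlib
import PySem

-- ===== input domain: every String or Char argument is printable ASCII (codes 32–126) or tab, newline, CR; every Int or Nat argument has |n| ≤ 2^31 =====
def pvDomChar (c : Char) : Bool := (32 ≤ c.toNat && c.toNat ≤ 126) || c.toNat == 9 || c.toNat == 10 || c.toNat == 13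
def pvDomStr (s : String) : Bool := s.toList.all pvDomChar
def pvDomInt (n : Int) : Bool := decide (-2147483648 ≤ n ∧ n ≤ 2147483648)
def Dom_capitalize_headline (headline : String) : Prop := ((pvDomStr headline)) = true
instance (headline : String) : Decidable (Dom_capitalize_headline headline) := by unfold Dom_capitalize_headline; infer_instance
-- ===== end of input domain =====

-- B replaces A's three-pass scan (parallel words/splitters lists + zip_longest reassembly)
-- with one left-to-right tokenizing pass; objective: simpler. Return-value equivalence only.

-- ===== PORT A =====
def pvQuote (c : Char) : Bool := c = '"' || c = '\'' || c = Char.ofNat 0x2018 || c = Char.ofNat 0x201C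

def pvDoNotCapitalize : List (List Char) :=
  [['a'], ['a','n'], ['t','h','e'], ['a','n','d'], ['b','u','t'], ['f','o','r'],
   ['a','t'], ['b','y'], ['i','n'], ['t','o'], ['o','f']]

-- uppercase_first_letter: scan indices 0.. for the first non-quote char; capitalize it
def pvUpA (word : List Char) (i : Nat) : List Char :=
  if h : i < word.length then
    if pvQuote word[i] then pvUpA word (i + 1)
    else word.take i ++ word[i].toUpper :: word.drop (i + 1)
  else word
termination_by word.length - i

def pvStepA (st : List (List Char) × List Char × List Char) (c : Char) :
    List (List Char) × List Char × List Char :=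
  if c = ' ' ∨ c = '-' then (st.1 ++ [st.2.2], st.2.1 ++ [c], [])
  else (st.1, st.2.1, st.2.2 ++ [c])

def pvCapFixA (w : List Char) : List Char :=
  if w.filter Char.isAlpha ∈ pvDoNotCapitalize then w else pvUpA w 0

def pvZipLongest : List (List Char) → List Char → List (List Char × List Char)
  | [], [] => []
  | x :: xs, [] => (x, []) :: pvZipLongest xs []
  | [], y :: ys => ([], [y]) :: pvZipLongest [] ys
  | x :: xs, y :: ys => (x, [y]) :: pvZipLongest xs ys

def pvPipeA (cs : List Char) : List Char :=
  let scan := cs.foldl pvStepA ([], [], [])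
  let words := scan.1 ++ [scan.2.2]
  ((pvZipLongest (words.map pvCapFixA) scan.2.1).map (fun p => p.1 ++ p.2)).flatten

def capitalize_headline (headline : String) : String :=
  String.ofList (pvPipeA headline.toList)

-- ===== PORT B =====
def pvDelim (c : Char) : Bool := c = ' ' || c = '-'

-- uppercase_first_letter: skip the run of leading quotes, uppercase the next char
def pvUpB (w : List Char) : List Char :=
  match w.dropWhile pvQuote with
  | [] => w
  | c :: rest => w.takeWhile pvQuote ++ c.toUpper :: rest

def pvCapFixB (w : List Char) : List Char :=
  if w.filter Char.isAlpha ∈ pvDoNotCapitalize then w else pvUpB w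

def pvGoB (cs : List Char) : List Char :=
  match h : cs.dropWhile (fun c => !pvDelim c) with
  | [] => pvCapFixB (cs.takeWhile (fun c => !pvDelim c))
  | d :: rest => pvCapFixB (cs.takeWhile (fun c => !pvDelim c)) ++ d :: pvGoB rest
termination_by cs.length
decreasing_by
  have h1 : (cs.dropWhile (fun c => !pvDelim c)).length ≤ cs.length :=
    List.length_dropWhile_le _ _
  rw [h] at h1
  simpa using Nat.lt_of_lt_of_le (Nat.lt_succ_self _) h1

def capitalize_headline_alt (headline : String) : String :=
  String.ofList (pvGoB headline.toList)

-- ===== PRECONDITION & SPEC =====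
def Spec_capitalize_headline (headline : String) (out : String) : Prop := out = capitalize_headline_alt headline
instance (headline : String) (out : String) : Decidable (Spec_capitalize_headline headline out) := by unfold Spec_capitalize_headline; infer_instance

-- ===== CLAIM (what is proved, stated in full; the proofs are below) =====
def Claim_equal_capitalize_headline : Prop := ∀ (headline : String), Dom_capitalize_headline headline → Spec_capitalize_headline headline (capitalize_headline headline)

-- ===== LEMMAS AND PROOFS =====

theorem pvUpB_nil : pvUpB [] = [] := rfl

theorem pvUpB_quote (c : Char) (h : pvQuote c = true) (rest : List Char) :
    pvUpB (c :: rest) = c :: pvUpB rest := by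
  simp only [pvUpB, List.dropWhile_cons, List.takeWhile_cons, h, if_pos]
  cases rest.dropWhile pvQuote <;> simp

theorem pvUpB_not_quote (c : Char) (h : pvQuote c = false) (rest : List Char) :
    pvUpB (c :: rest) = c.toUpper :: rest := by
  simp [pvUpB, h]

theorem pvUpA_eq (word : List Char) (i : Nat) :
    pvUpA word i = word.take i ++ pvUpB (word.drop i) := by
  rw [pvUpA]
  by_cases h : i < word.length
  · have hdrop : word.drop i = word[i] :: word.drop (i + 1) :=
      (List.getElem_cons_drop h).symm
    have htake : word.take (i + 1) = word.take i ++ [word[i]] := by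
      rw [List.take_add_one]; simp [List.getElem?_eq_getElem h]
    by_cases hq : pvQuote word[i] = true
    · rw [dif_pos h, if_pos hq, pvUpA_eq word (i + 1), hdrop,
        pvUpB_quote _ hq]
      rw [htake, List.append_assoc]
      rfl
    · rw [dif_pos h, if_neg hq, hdrop, pvUpB_not_quote _ (by simpa using hq)]
  · rw [dif_neg h]
    have : word.drop i = [] := List.drop_eq_nil_of_le (Nat.le_of_not_lt h)
    rw [this, pvUpB_nil, List.append_nil,
      List.take_of_length_le (Nat.le_of_not_lt h)]
termination_by word.length - i

theorem pvCapFix_eq (w : List Char) : pvCapFixA w = pvCapFixB w := by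
  simp [pvCapFixA, pvCapFixB, pvUpA_eq, pvUpB]

theorem pvFoldl_shift (cs : List Char) (W : List (List Char)) (S : List Char)
    (u : List Char) :
    cs.foldl pvStepA (W, S, u) =
      (W ++ (cs.foldl pvStepA ([], [], u)).1,
       S ++ (cs.foldl pvStepA ([], [], u)).2.1,
       (cs.foldl pvStepA ([], [], u)).2.2) := by
  induction cs generalizing W S u with
  | nil => simp
  | cons c cs ih =>
    by_cases hc : c = ' ' ∨ c = '-'

    · simp only [List.foldl_cons, pvStepA, if_pos hc, List.nil_append]
      rw [ih (W ++ [u]) (S ++ [c]) [], ih [u] [c] []]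
      simp
    · simp only [List.foldl_cons, pvStepA, if_neg hc]
      exact ih W S (u ++ [c])

theorem pvFoldl_free (t : List Char) (h : ∀ c ∈ t, ¬(c = ' ' ∨ c = '-'))
    (u : List Char) : t.foldl pvStepA ([], [], u) = ([], [], u ++ t) := by
  induction t generalizing u with
  | nil => simp
  | cons c t ih =>
    have hc : ¬(c = ' ' ∨ c = '-') := h c (by simp)
    simp only [List.foldl_cons, pvStepA, if_neg hc]
    rw [ih (fun c hc => h c (by simp [hc])) (u ++ [c])]
    simp

theorem pvDelim_iff (c : Char) : pvDelim c = true ↔ (c = ' ' ∨ c = '-') := by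
  simp [pvDelim]

theorem pvPipeA_eq_pvGoB (cs : List Char) : pvPipeA cs = pvGoB cs := by
  have hsplit : cs.takeWhile (fun c => !pvDelim c) ++
      cs.dropWhile (fun c => !pvDelim c) = cs := List.takeWhile_append_dropWhile
  have hfree : ∀ c ∈ cs.takeWhile (fun c => !pvDelim c), ¬(c = ' ' ∨ c = '-') := by
    intro c hc
    have := List.mem_takeWhile_imp hc
    simp only [Bool.not_eq_eq_eq_not, Bool.not_true] at this
    rw [← pvDelim_iff]; simp [this]
  rw [pvGoB]
  cases hd : cs.dropWhile (fun c => !pvDelim c) with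
  | nil =>
    have hcs : cs = cs.takeWhile (fun c => !pvDelim c) := by
      conv_lhs => rw [← hsplit]
      simp [hd]
    rw [pvPipeA]
    conv_lhs => rw [hcs]
    rw [pvFoldl_free _ hfree []]
    simp [pvZipLongest, pvCapFix_eq]
  | cons d rest =>
    have hdd : pvDelim d = true := by
      have hlen : 0 < (cs.dropWhile (fun c => !pvDelim c)).length := by
        rw [hd]; simp
      have := List.dropWhile_get_zero_not (fun c => !pvDelim c) cs hlen
      simp only [List.get_eq_getElem, hd] at this
      simpa using this
    have hdelim : d = ' ' ∨ d = '-' := (pvDelim_iff d).mp hdd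
    have hcs : cs = cs.takeWhile (fun c => !pvDelim c) ++ d :: rest := by
      conv_lhs => rw [← hsplit]; rw [hd]
    have hrest : pvPipeA rest = pvGoB rest := pvPipeA_eq_pvGoB rest
    rw [pvPipeA]
    conv_lhs => rw [hcs]
    rw [List.foldl_append, pvFoldl_free _ hfree [], List.foldl_cons]
    simp only [pvStepA, if_pos hdelim, List.nil_append]
    rw [pvFoldl_shift rest [cs.takeWhile (fun c => !pvDelim c)] [d] []]
    simp only [List.cons_append, List.nil_append, List.map_cons, pvZipLongest,
      List.flatten_cons]
    rw [pvCapFix_eq, ← hrest, pvPipeA]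
    simp
termination_by cs.length
decreasing_by
  have h1 : (cs.dropWhile (fun c => !pvDelim c)).length ≤ cs.length :=
    List.length_dropWhile_le _ _
  rw [hd] at h1
  simpa using Nat.lt_of_lt_of_le (Nat.lt_succ_self _) h1

-- ===== VERDICT (by name: the statement is the Claim_ definition above) =====
theorem capitalize_headline_spec : Claim_equal_capitalize_headline := by
  intro headline _
  unfold Spec_capitalize_headline capitalize_headline capitalize_headline_alt
  rw [pvPipeA_eq_pvGoB]
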